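-- pv_equiv track=rewrite | github.com/KaiboLiu/Algorithm_Online_Judge | codeJam/2018/kickstart/A.py | A_nines_2
-- ===== SOURCE A (Python) =====
-- def A_nines_2(l):
--     if l == 0: return 0
--     s = str(l)
--     n, first = len(s), int(s[0])
--     if n == 1: return 2
--     left = pre[n] if first == 9 else first*pre[n-1]
--     right = A_nines_2(l - first * 10**(n-1))
--     return left + right
--
-- pre = [0,2, 28, 352, 4168, 47512, 527608, 5748472, 61736248, 655626232,
--         6900636088, 72105724792, 748951523128, 7740563708152, 79665073373368,
--         816985660360312, 8352870943242808, 85175838489185272, 866582546402667448]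
-- ===== SOURCE B (Python) =====
-- pre = [0,2, 28, 352, 4168, 47512, 527608, 5748472, 61736248, 655626232,
--         6900636088, 72105724792, 748951523128, 7740563708152, 79665073373368,
--         816985660360312, 8352870943242808, 85175838489185272, 866582546402667448]
--
-- def A_nines_2(l):
--     # one pass over the decimal digits from the least-significant end:
--     # digit d at 0-based position k contributes 2 (k==0), pre[k+1] (d==9) or d*pre[k]
--     d = l % 10
--     q = l // 10
--     total = 2 if d else 0
--     k = 0
--     while q:
--         k += 1
--         d = q % 10
--         q = q // 10
--         if d:
--             total += pre[k + 1] if d == 9 else d * pre[k]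
--     return total
-- ===== Notes on version B (the rewrite author's own statement) =====
-- stated objective: alternative
-- what changed: B abandons A's string-based recursion on the leading digit: it makes one arithmetic divmod pass over the decimal digits from the least-significant end (no str() conversion, no recursion), summing each nonzero digit's table contribution by its position.
import Mathlib
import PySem

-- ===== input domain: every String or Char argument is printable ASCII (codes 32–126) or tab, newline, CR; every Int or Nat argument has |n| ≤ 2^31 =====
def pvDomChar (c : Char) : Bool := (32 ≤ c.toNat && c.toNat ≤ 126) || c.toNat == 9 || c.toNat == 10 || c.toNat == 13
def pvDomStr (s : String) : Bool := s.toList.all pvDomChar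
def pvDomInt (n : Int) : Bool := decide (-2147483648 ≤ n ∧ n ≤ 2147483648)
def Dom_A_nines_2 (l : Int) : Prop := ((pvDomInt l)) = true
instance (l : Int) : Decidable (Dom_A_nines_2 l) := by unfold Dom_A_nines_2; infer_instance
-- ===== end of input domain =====

-- B drops A's recursion on the leading digit entirely: a single arithmetic pass over the
-- decimal digits from the least-significant end (divmod loop), no string conversion.

-- ===== PORT A =====
-- the module-level table `pre`
def pre : List Int := [0, 2, 28, 352, 4168, 47512, 527608, 5748472, 61736248, 655626232,
  6900636088, 72105724792, 748951523128, 7740563708152, 79665073373368,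
  816985660360312, 8352870943242808, 85175838489185272, 866582546402667448]

-- `first = int(s[0])`: int('-') (negative l) raises ValueError = none, excluded by Pre_
def pvFirstDigit (s : List Char) : Int :=
  match PySem.List.pyGet? s 0 with
  | some c => (PySem.Int.ofChars? [c]).getD 0
  | none => 0

-- A's recursion, with a fuel guard that only makes it total (l.toNat + 1 steps always suffice:
-- each recursive call strictly decreases a nonnegative l)
def A_go (fuel : Nat) (l : Int) : Int :=
  match fuel with
  | 0 => 0
  | fuel + 1 =>
    if l = 0 then 0
    else
      let s := PySem.Int.toChars l
      let n := s.length
      let first := pvFirstDigit s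
      if n = 1 then 2
      else
        let left := if first = 9 then PySem.List.pyGetD pre (n : Int) 0
                    else first * PySem.List.pyGetD pre ((n : Int) - 1) 0
        let right := A_go fuel (l - first * 10 ^ (n - 1))
        left + right

def A_nines_2 (l : Int) : Int := A_go (l.toNat + 1) l

-- ===== PORT B =====
-- B's while-loop: strip one least-significant digit of q per step (k is the 0-based position),
-- with a fuel guard that only makes it total (q shrinks by a factor of 10 each step)
def B_loop (fuel : Nat) (q : Int) (k : Int) (total : Int) : Int :=
  match fuel with
  | 0 => total
  | fuel + 1 =>
    if q = 0 then total
    else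
      let k' := k + 1
      let d := PySem.Int.mod q 10
      let q' := PySem.Int.floordiv q 10
      let total' := if d ≠ 0 then
          total + (if d = 9 then PySem.List.pyGetD pre (k' + 1) 0
                   else d * PySem.List.pyGetD pre k' 0)
        else total
      B_loop fuel q' k' total'

def A_nines_2_alt (l : Int) : Int :=
  let d := PySem.Int.mod l 10
  let q := PySem.Int.floordiv l 10
  let total := if d ≠ 0 then (2 : Int) else 0
  B_loop (l.toNat + 1) q 0 total

-- ===== PRECONDITION & SPEC =====
-- Pre_ excludes negative l, where Python's int(s[0]) sees '-' and A raises ValueError.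
def Pre_A_nines_2 (l : Int) : Prop := 0 ≤ l
instance (l : Int) : Decidable (Pre_A_nines_2 l) := by unfold Pre_A_nines_2; infer_instance
def pvWitness_A_nines_2 : Int := (100)

def Spec_A_nines_2 (l : Int) (out : Int) : Prop := out = A_nines_2_alt l
instance (l : Int) (out : Int) : Decidable (Spec_A_nines_2 l out) := by unfold Spec_A_nines_2; infer_instance

-- ===== CLAIM (what is proved, stated in full; the proofs are below) =====
def Claim_equal_A_nines_2 : Prop := ∀ (l : Int), Dom_A_nines_2 l → Pre_A_nines_2 l → Spec_A_nines_2 l (A_nines_2 l)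

-- ===== LEMMAS AND PROOFS =====

-- contribution of one decimal digit d at 0-based position k (from the least-significant end)
def contrib (d : Int) (k : Nat) : Int :=
  if d = 0 then 0
  else if k = 0 then 2
  else if d = 9 then PySem.List.pyGetD pre ((k : Int) + 1) 0
  else d * PySem.List.pyGetD pre (k : Int) 0

-- the common specification: sum of contributions of the digits of m at positions k, k+1, …
def T (m : Nat) (k : Nat) : Int :=
  if m = 0 then 0 else contrib ((m % 10 : Nat) : Int) k + T (m / 10) (k + 1)
decreasing_by exact Nat.div_lt_self (Nat.pos_of_ne_zero (by assumption)) (by omega)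

theorem T_zero (k : Nat) : T 0 k = 0 := by simp [T]

theorem T_pos (m k : Nat) (h : m ≠ 0) :
    T m k = contrib ((m % 10 : Nat) : Int) k + T (m / 10) (k + 1) := by
  rw [T]; simp [h]

-- ===== B side: the loop computes T =====
-- one unrolling of the loop
theorem B_loop_succ (f : Nat) (q k total : Int) (h : q ≠ 0) :
    B_loop (f + 1) q k total = B_loop f (PySem.Int.floordiv q 10) (k + 1)
      (if PySem.Int.mod q 10 ≠ 0 then
          total + (if PySem.Int.mod q 10 = 9 then PySem.List.pyGetD pre (k + 1 + 1) 0
                   else PySem.Int.mod q 10 * PySem.List.pyGetD pre (k + 1) 0)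
        else total) := by
  rw [B_loop, if_neg h]

theorem B_loop_eq_T (fuel : Nat) : ∀ (m k : Nat) (total : Int), m < fuel →
    B_loop fuel (m : Int) (k : Int) total = total + T m (k + 1) := by
  induction fuel with
  | zero => omega
  | succ f ih =>
    intro m k total hm
    by_cases h0 : m = 0
    · subst h0; simp [B_loop, T_zero]
    · have hd : PySem.Int.mod (m : Int) 10 = ((m % 10 : Nat) : Int) := by
        exact_mod_cast PySem.Int.mod_natCast m 10
      have hq : PySem.Int.floordiv (m : Int) 10 = ((m / 10 : Nat) : Int) := by
        exact_mod_cast PySem.Int.floordiv_natCast m 10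
      have hk : (k : Int) + 1 = ((k + 1 : Nat) : Int) := by push_cast; ring
      rw [B_loop_succ f (m : Int) (k : Int) total (by exact_mod_cast h0)]
      rw [hd, hq, hk]
      rw [ih (m / 10) (k + 1) _ (by omega)]
      rw [T_pos m (k + 1) h0]
      have hc : (if ((m % 10 : Nat) : Int) ≠ 0 then
            total + (if ((m % 10 : Nat) : Int) = 9 then PySem.List.pyGetD pre (((k + 1 : Nat) : Int) + 1) 0
                     else ((m % 10 : Nat) : Int) * PySem.List.pyGetD pre ((k + 1 : Nat) : Int) 0)
          else total) = total + contrib ((m % 10 : Nat) : Int) (k + 1) := by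
        unfold contrib
        split_ifs <;> first | ring1 | omega | (exfalso; omega)
      rw [hc]; ring

theorem B_alt_eq_T (m : Nat) : A_nines_2_alt (m : Int) = T m 0 := by
  unfold A_nines_2_alt
  have hd : PySem.Int.mod (m : Int) 10 = ((m % 10 : Nat) : Int) := by
    exact_mod_cast PySem.Int.mod_natCast m 10
  have hq : PySem.Int.floordiv (m : Int) 10 = ((m / 10 : Nat) : Int) := by
    exact_mod_cast PySem.Int.floordiv_natCast m 10
  rw [hd, hq]
  have hB := B_loop_eq_T ((m : Int).toNat + 1) (m / 10) 0 (if ((m % 10 : Nat) : Int) ≠ 0 then (2:Int) else 0)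
    (by simp only [Int.toNat_natCast]; omega)
  simp only [Int.toNat_natCast, Nat.cast_zero] at hB ⊢
  rw [hB]
  have hc : (if ((m % 10 : Nat) : Int) ≠ 0 then (2 : Int) else 0)
      = contrib ((m % 10 : Nat) : Int) 0 := by
    unfold contrib
    split_ifs <;> first | ring1 | omega
  rw [hc]
  by_cases h0 : m = 0
  · subst h0; simp [T_zero, contrib]
  · rw [T_pos m 0 h0]

-- ===== A side =====

-- toDigits is the reversed digit list rendered with digitChar
theorem toDigits_eq_digits (m : Nat) (h : 0 < m) :
    Nat.toDigits 10 m = ((Nat.digits 10 m).reverse.map Nat.digitChar) := by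
  induction m using Nat.strong_induction_on with
  | _ m ih =>
    by_cases hlt : m < 10
    · rw [Nat.toDigits_of_lt_base hlt]
      rw [Nat.digits_def' (by omega : (1:Nat) < 10) h]
      rw [Nat.div_eq_of_lt hlt, Nat.mod_eq_of_lt hlt]
      simp
    · rw [Nat.toDigits_of_base_le (by omega) (by omega)]
      rw [Nat.digits_def' (b := 10) (by omega) h]
      have hq : 0 < m / 10 := Nat.div_pos (by omega) (by omega)
      rw [ih (m / 10) (Nat.div_lt_self h (by omega)) hq]
      simp

-- the digits of d*10^j + r (1 ≤ d ≤ 9, r < 10^j) end in d after j low digits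
theorem digits_decomp (j : Nat) : ∀ (d r : Nat), 1 ≤ d → d ≤ 9 → r < 10 ^ j →
    ∃ L : List Nat, Nat.digits 10 (d * 10 ^ j + r) = L ++ [d] ∧ L.length = j := by
  induction j with
  | zero =>
    intro d r h1 h9 hr
    interval_cases r
    refine ⟨[], ?_, rfl⟩
    have hd : d * 10 ^ 0 + 0 = d := by ring
    rw [hd, Nat.digits_def' (by omega : (1:Nat) < 10) (by omega),
      Nat.mod_eq_of_lt (by omega), Nat.div_eq_of_lt (by omega)]
    simp
  | succ j ih =>
    intro d r h1 h9 hr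
    have hm : 0 < d * 10 ^ (j + 1) + r := by positivity
    rw [Nat.digits_def' (b := 10) (by omega) hm]
    have hmod : (d * 10 ^ (j + 1) + r) % 10 = r % 10 := by
      have : d * 10 ^ (j + 1) = (d * 10 ^ j) * 10 := by ring
      omega
    have hdiv : (d * 10 ^ (j + 1) + r) / 10 = d * 10 ^ j + r / 10 := by
      have : d * 10 ^ (j + 1) = (d * 10 ^ j) * 10 := by ring
      omega
    rw [hmod, hdiv]
    obtain ⟨L, hL, hlen⟩ := ih d (r / 10) h1 h9 (by
      have : 10 ^ (j + 1) = 10 ^ j * 10 := by ring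
      omega)
    exact ⟨r % 10 :: L, by simp [hL], by simp [hlen]⟩

-- the key arithmetic fact about T: stripping the leading digit
theorem T_strip (j : Nat) : ∀ (d r k : Nat), 1 ≤ d → d ≤ 9 → r < 10 ^ j →
    T (d * 10 ^ j + r) k = contrib (d : Int) (k + j) + T r k := by
  induction j with
  | zero =>
    intro d r k h1 h9 hr
    interval_cases r
    rw [T_pos _ _ (by omega)]
    rw [Nat.mod_eq_of_lt (by omega), Nat.div_eq_of_lt (by omega)]
    simp [T_zero]
  | succ j ih =>
    intro d r k h1 h9 hr
    have hm : d * 10 ^ (j + 1) + r ≠ 0 := by positivity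
    rw [T_pos _ _ hm]
    have hmod : (d * 10 ^ (j + 1) + r) % 10 = r % 10 := by
      have : d * 10 ^ (j + 1) = (d * 10 ^ j) * 10 := by ring
      omega
    have hdiv : (d * 10 ^ (j + 1) + r) / 10 = d * 10 ^ j + r / 10 := by
      have : d * 10 ^ (j + 1) = (d * 10 ^ j) * 10 := by ring
      omega
    rw [hmod, hdiv, ih d (r / 10) (k + 1) h1 h9 (by
      have : 10 ^ (j + 1) = 10 ^ j * 10 := by ring
      omega)]
    have hTr : T r k = contrib ((r % 10 : Nat) : Int) k + T (r / 10) (k + 1) := by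
      by_cases h0 : r = 0
      · subst h0; simp [T_zero, contrib]
      · exact T_pos r k h0
    rw [hTr]
    have : k + 1 + j = k + (j + 1) := by omega
    rw [this]
    ring

-- int(s[0]) of the rendered digit is the digit back
theorem firstDigit_digitChar (d : Nat) (h1 : 1 ≤ d) (h9 : d ≤ 9) (rest : List Char) :
    pvFirstDigit (Nat.digitChar d :: rest) = (d : Int) := by
  have hcons : pvFirstDigit (Nat.digitChar d :: rest)
      = (PySem.Int.ofChars? [Nat.digitChar d]).getD 0 := by
    simp [pvFirstDigit]
  rw [hcons]
  interval_cases d <;> rfl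

-- ===== main: A computes T =====
theorem A_go_eq_T (fuel : Nat) : ∀ (m : Nat), m < fuel → A_go fuel (m : Int) = T m 0 := by
  induction fuel with
  | zero => omega
  | succ f ih =>
    intro m hm
    by_cases h0 : m = 0
    · subst h0; simp [A_go, T_zero]
    · have hs : PySem.Int.toChars (m : Int) = Nat.toDigits 10 m := by
        simp [PySem.Int.toChars]
      by_cases hlt : m < 10
      · rw [A_go, if_neg (show ¬((m : Int) = 0) by exact_mod_cast h0)]
        simp only [hs, Nat.toDigits_of_lt_base hlt, List.length_singleton]
        rw [if_pos trivial]
        rw [T_pos m 0 h0, Nat.mod_eq_of_lt hlt, Nat.div_eq_of_lt hlt, T_zero]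
        unfold contrib
        rw [if_neg (show ¬((m : Nat) : Int) = 0 by exact_mod_cast h0), if_pos rfl]
        ring
      · -- m ≥ 10: peel the leading digit
        have hmpos : 0 < m := by omega
        have h10j : 10 ^ Nat.log 10 m ≤ m := Nat.pow_log_le_self 10 (by omega)
        have hlt2 : m < 10 ^ (Nat.log 10 m + 1) := Nat.lt_pow_succ_log_self (by omega) m
        have hj1 : 1 ≤ Nat.log 10 m := Nat.le_log_of_pow_le (by omega) (by simpa using hlt)
        set j := Nat.log 10 m with hjdef
        set d := m / 10 ^ j with hddef
        set r := m % 10 ^ j with hrdef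
        have hd1 : 1 ≤ d := Nat.le_div_iff_mul_le (by positivity) |>.mpr (by omega)
        have hd9 : d ≤ 9 := by
          have : m / 10 ^ j < 10 := by
            apply Nat.div_lt_of_lt_mul
            calc m < 10 ^ (j + 1) := hlt2
            _ = 10 ^ j * 10 := by ring
          omega
        have hr : r < 10 ^ j := Nat.mod_lt _ (by positivity)
        have hmdec : m = d * 10 ^ j + r := by
          rw [hddef, hrdef]; exact (Nat.div_add_mod' m (10 ^ j)).symm
        obtain ⟨L, hL, hlen⟩ := digits_decomp j d r hd1 hd9 hr
        rw [← hmdec] at hL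
        have hsd : Nat.toDigits 10 m = Nat.digitChar d :: (L.reverse.map Nat.digitChar) := by
          rw [toDigits_eq_digits m hmpos, hL]; simp
        rw [A_go, if_neg (show ¬((m : Int) = 0) by exact_mod_cast h0)]
        simp only [hs, hsd, List.length_cons, List.length_map, List.length_reverse, hlen]
        rw [if_neg (by omega : ¬(j + 1 = 1))]
        rw [firstDigit_digitChar d hd1 hd9]
        have harg : (m : Int) - (d : Int) * 10 ^ (j + 1 - 1) = (r : Int) := by
          have : j + 1 - 1 = j := by omega
          rw [this, hmdec]; push_cast; ring
        rw [harg, ih r (by omega)]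
        conv_rhs => rw [hmdec]
        rw [T_strip j d r 0 hd1 hd9 hr, Nat.zero_add]
        unfold contrib
        rw [if_neg (show ¬((d : Nat) : Int) = 0 by exact_mod_cast (by omega : ¬ d = 0)),
          if_neg (by omega : ¬ j = 0)]
        by_cases h9 : ((d : Nat) : Int) = 9
        · rw [if_pos h9, if_pos h9]
          have : ((j + 1 : Nat) : Int) = (j : Int) + 1 := by push_cast; ring
          rw [this]
        · rw [if_neg h9, if_neg h9]
          have : ((j + 1 : Nat) : Int) - 1 = (j : Int) := by push_cast; ring
          rw [this]

-- ===== VERDICT (by name: the statement is the Claim_ definition above) =====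
theorem A_nines_2_spec : Claim_equal_A_nines_2 := by
  intro l _ hl
  unfold Spec_A_nines_2 A_nines_2
  obtain ⟨m, rfl⟩ := Int.eq_ofNat_of_zero_le hl
  simp only [Int.toNat_natCast]
  rw [A_go_eq_T (m + 1) m (by omega), B_alt_eq_T]
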